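-- pv_equiv track=rewrite | github.com/svrvt/vc_ranger | .config/ranger/commands.py | _split_args_to_batches
-- ===== SOURCE A (Python) =====
-- def _split_args_to_batches(args, max_args_len):
--     batches = []
--     current_batch = []
--     current_batch_len = 0
--     for arg in args:
--         arg_len = len(arg)
--         if current_batch_len + arg_len > max_args_len:
--             batches.append(current_batch)
--             current_batch = []
--             current_batch_len = 0
--         current_batch.append(arg)
--         current_batch_len += arg_len
--     batches.append(current_batch)
--     assert (sum(len(batch) for batch in batches)) == len(args)
--     return batches
-- ===== SOURCE B (Python) =====
-- def _split_args_to_batches(args, max_args_len):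
--     args = list(args)
--     # First pass: record the index where each new batch must start.
--     bounds = [0]
--     cur_len = 0
--     for i, arg in enumerate(args):
--         arg_len = len(arg)
--         if cur_len + arg_len > max_args_len:
--             bounds.append(i)
--             cur_len = 0
--         cur_len += arg_len
--     bounds.append(len(args))
--     # Second pass: slice args between consecutive boundaries.
--     batches = [args[bounds[k]:bounds[k + 1]] for k in range(len(bounds) - 1)]
--     assert (sum(len(batch) for batch in batches)) == len(args)
--     return batches
-- ===== Notes on version B (the rewrite author's own statement) =====
-- stated objective: alternative
-- what changed: B replaces the batch-building accumulator with a two-pass index-then-slice scheme: one pass records the boundary indices where a new batch starts, a second pass materialises the batches by slicing args between consecutive boundaries.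
import Mathlib
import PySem

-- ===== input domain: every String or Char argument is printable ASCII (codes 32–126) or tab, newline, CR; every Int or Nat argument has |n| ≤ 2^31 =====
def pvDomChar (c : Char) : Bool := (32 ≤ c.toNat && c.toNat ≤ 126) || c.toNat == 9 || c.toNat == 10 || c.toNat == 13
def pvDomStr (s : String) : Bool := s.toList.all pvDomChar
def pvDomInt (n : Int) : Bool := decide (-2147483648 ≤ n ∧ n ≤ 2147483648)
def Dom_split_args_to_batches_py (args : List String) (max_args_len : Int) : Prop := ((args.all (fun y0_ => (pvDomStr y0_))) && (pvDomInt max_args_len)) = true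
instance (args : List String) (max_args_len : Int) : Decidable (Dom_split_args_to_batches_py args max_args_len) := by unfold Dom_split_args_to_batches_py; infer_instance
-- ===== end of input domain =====

-- B builds batches by a boundary-index pass followed by slicing, instead of A's accumulated sublists; same cost, different decomposition.

-- ===== PORT A =====
-- for-loop over args with state (batches, current_batch, current_batch_len); the final assert always holds and is not a raising point.
def split_args_to_batches_py (args : List String) (max_args_len : Int) : List (List String) :=
  let st := args.foldl (fun (st : List (List String) × List String × Int) arg =>
    let batches := st.1
    let current_batch := st.2.1
    let current_batch_len := st.2.2
    let arg_len := PySem.Str.len arg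
    if current_batch_len + arg_len > max_args_len then
      (batches ++ [current_batch], [arg], arg_len)
    else
      (batches, current_batch ++ [arg], current_batch_len + arg_len)) ([], [], 0)
  st.1 ++ [st.2.1]

-- ===== PORT B =====
-- first pass of Source B: over enumerate(args), record each index where a new batch starts
def pvBounds (max_args_len : Int) : List (Int × String) → Int → List Int
  | [], _ => []
  | (i, arg) :: rest, cur_len =>
    let arg_len := PySem.Str.len arg
    if cur_len + arg_len > max_args_len then
      i :: pvBounds max_args_len rest arg_len
    else
      pvBounds max_args_len rest (cur_len + arg_len)

-- second pass of Source B: slice args between each pair of consecutive boundaries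
def pvPairSlices (args : List String) : List Int → List (List String)
  | b0 :: b1 :: rest => PySem.List.slice args (some b0) (some b1) :: pvPairSlices args (b1 :: rest)
  | _ => []

def split_args_to_batches_py_alt (args : List String) (max_args_len : Int) : List (List String) :=
  let bounds := 0 :: pvBounds max_args_len (PySem.List.enumerate args 0) 0 ++ [PySem.List.len args]
  pvPairSlices args bounds

-- ===== PRECONDITION & SPEC =====
def Spec_split_args_to_batches_py (args : List String) (max_args_len : Int) (out : List (List String)) : Prop := out = split_args_to_batches_py_alt args max_args_len
instance (args : List String) (max_args_len : Int) (out : List (List String)) : Decidable (Spec_split_args_to_batches_py args max_args_len out) := by unfold Spec_split_args_to_batches_py; infer_instance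

-- ===== CLAIM (what is proved, stated in full; the proofs are below) =====
def Claim_equal_split_args_to_batches_py : Prop := ∀ (args : List String) (max_args_len : Int), Dom_split_args_to_batches_py args max_args_len → Spec_split_args_to_batches_py args max_args_len (split_args_to_batches_py args max_args_len)

-- ===== LEMMAS AND PROOFS =====

-- common reference: the batches both programs denote, as a structural recursion
def pvChunks (m : Int) : List String → Int → List String → List (List String)
  | [], _, cur => [cur]
  | a :: rest, clen, cur =>
    let al := PySem.Str.len a
    if clen + al > m then cur :: pvChunks m rest al [a]
    else pvChunks m rest (clen + al) (cur ++ [a])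

theorem pvA_eq_chunks (m : Int) (args : List String) :
    ∀ (batches : List (List String)) (cur : List String) (clen : Int),
    (let st := args.foldl (fun (st : List (List String) × List String × Int) arg =>
      let batches := st.1
      let current_batch := st.2.1
      let current_batch_len := st.2.2
      let arg_len := PySem.Str.len arg
      if current_batch_len + arg_len > m then
        (batches ++ [current_batch], [arg], arg_len)
      else
        (batches, current_batch ++ [arg], current_batch_len + arg_len)) (batches, cur, clen)
     st.1 ++ [st.2.1]) = batches ++ pvChunks m args clen cur := by
  induction args with
  | nil => intro batches cur clen; simp [pvChunks]
  | cons a rest ih =>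
    intro batches cur clen
    simp only [List.foldl_cons, pvChunks]
    by_cases h : clen + PySem.Str.len a > m
    · rw [if_pos h, if_pos h, ih (batches ++ [cur]) [a] (PySem.Str.len a)]
      simp
    · rw [if_neg h, if_neg h, ih batches (cur ++ [a]) (clen + PySem.Str.len a)]

theorem pvB_eq_chunks (m : Int) (full : List String) :
    ∀ (rest : List String) (i j : Nat) (clen : Int), j ≤ i → i ≤ full.length → full.drop i = rest →
    pvPairSlices full ((j : Int) :: (pvBounds m (PySem.List.enumerate rest (i : Int)) clen ++ [PySem.List.len full]))
      = pvChunks m rest clen ((full.drop j).take (i - j)) := by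
  intro rest
  induction rest with
  | nil =>
    intro i j clen hj hi hdrop
    have hil : i = full.length := by
      have := congrArg List.length hdrop; simp at this; omega
    simp only [PySem.List.enumerate_nil, pvBounds, List.nil_append, pvPairSlices, pvChunks]
    rw [PySem.List.len_eq]
    rw [show ((full.length : Int)) = ((full.length : Nat) : Int) by simp]
    rw [PySem.List.slice_natCast]
    congr 1
    rw [hil]
  | cons a rs ih =>
    intro i j clen hj hi hdrop
    have hia : full[i]? = some a := by
      have : (full.drop i)[0]? = some a := by rw [hdrop]; rfl
      rwa [List.getElem?_drop, Nat.add_zero] at this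
    have hilen : i < full.length := by
      have := congrArg List.length hdrop; simp at this; omega
    rw [PySem.List.enumerate_cons]
    simp only [pvBounds, pvChunks]
    by_cases h : clen + PySem.Str.len a > m
    · simp only [if_pos h, List.cons_append, pvPairSlices]
      rw [show ((i : Int) + 1) = (((i + 1 : Nat)) : Int) by push_cast; ring]
      rw [ih (i + 1) i (PySem.Str.len a) (by omega) (by omega)
        (by rw [← List.drop_drop]; rw [hdrop]; rfl)]
      rw [PySem.List.slice_natCast]
      congr 2
      have : (full.drop i).take (i + 1 - i) = [a] := by
        rw [hdrop]; simp
      rw [this]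
    · simp only [if_neg h]
      rw [show ((i : Int) + 1) = (((i + 1 : Nat)) : Int) by push_cast; ring]
      rw [ih (i + 1) j (clen + PySem.Str.len a) (by omega) (by omega)
        (by rw [← List.drop_drop]; rw [hdrop]; rfl)]
      congr 1
      rw [show i + 1 - j = (i - j) + 1 by omega]
      rw [List.take_add_one]
      congr 1
      rw [List.getElem?_drop, show j + (i - j) = i by omega, hia]
      rfl

-- ===== VERDICT (by name: the statement is the Claim_ definition above) =====
theorem split_args_to_batches_py_spec : Claim_equal_split_args_to_batches_py := by
  intro args m _
  unfold Spec_split_args_to_batches_py split_args_to_batches_py split_args_to_batches_py_alt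
  dsimp only
  rw [pvA_eq_chunks m args [] [] 0, List.cons_append]
  rw [show (0 : Int) = ((0 : Nat) : Int) by simp]
  rw [pvB_eq_chunks m args args 0 0 ((0:Nat):Int) (by omega) (by omega) (by simp)]
  simp
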